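-- pv_equiv track=rewrite | github.com/pushparajrane-byte/Blast-Pipeline | app.py | parse_fasta_len
-- ===== SOURCE A (Python) =====
-- def parse_fasta_len(text: str) -> int:
--     """Return total nucleotide count of the first sequence in a FASTA string."""
--     if not text:
--         return 0
--     seq, started = [], False
--     for line in text.splitlines():
--         if line.startswith(">"):
--             if started:
--                 break
--             started = True
--             continue
--         if started:
--             seq.append(line.strip())
--     return len("".join(seq))
-- ===== SOURCE B (Python) =====
-- def parse_fasta_len(text: str) -> int:
--     """Return total nucleotide count of the first sequence in a FASTA string."""
--     lines = text.splitlines()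
--     headers = [i for i, line in enumerate(lines) if line.startswith(">")]
--     if not headers:
--         return 0
--     end = headers[1] if len(headers) > 1 else len(lines)
--     return sum(len(line.strip()) for line in lines[headers[0] + 1:end])
-- ===== Notes on version B (the rewrite author's own statement) =====
-- stated objective: alternative
-- what changed: Replaces A's stateful single pass (started flag, accumulator list, early break) with a precomputed list of header-line indices followed by a bounded slice-sum between the first header and the next header (or end of text).
import Mathlib
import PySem

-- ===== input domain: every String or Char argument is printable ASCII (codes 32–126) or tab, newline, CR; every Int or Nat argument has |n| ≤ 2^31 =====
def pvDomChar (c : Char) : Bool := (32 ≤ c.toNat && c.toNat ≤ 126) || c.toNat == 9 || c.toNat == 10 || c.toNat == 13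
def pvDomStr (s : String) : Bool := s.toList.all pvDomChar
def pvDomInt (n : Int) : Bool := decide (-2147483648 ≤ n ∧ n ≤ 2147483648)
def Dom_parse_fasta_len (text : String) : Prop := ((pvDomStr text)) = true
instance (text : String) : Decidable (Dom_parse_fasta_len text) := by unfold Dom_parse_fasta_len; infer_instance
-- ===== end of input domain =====

-- B replaces A's stateful single pass (started flag + break) with a precomputed list of
-- header-line indices followed by a slice-sum between the first two headers; same cost,
-- different decomposition.

-- ===== PORT A =====
-- the for-loop of A: state = (seq, started); returning seq models both `break` and loop end
def pvLoopA (ls : List String) (seq : List String) (started : Bool) : List String :=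
  match ls with
  | [] => seq
  | l :: rest =>
    if PySem.Str.startswith l ">" then
      if started then seq
      else pvLoopA rest seq true
    else
      if started then pvLoopA rest (seq ++ [PySem.Str.strip l]) started
      else pvLoopA rest seq started

def parse_fasta_len (text : String) : Int :=
  if text = "" then 0
  else PySem.Str.len (PySem.Str.join "" (pvLoopA (PySem.Str.splitlines text) [] false))

-- ===== PORT B =====
def parse_fasta_len_alt (text : String) : Int :=
  let lines := PySem.Str.splitlines text
  let headers := ((PySem.List.enumerate lines).filter
      (fun p => PySem.Str.startswith p.2 ">")).map (·.1)
  match headers with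
  | [] => 0
  | h0 :: rest =>
    let stop : Int := match rest with
      | h1 :: _ => h1
      | [] => (lines.length : Int)
    ((PySem.List.slice lines (some (h0 + 1)) (some stop)).map
        (fun line => PySem.Str.len (PySem.Str.strip line))).sum

-- ===== PRECONDITION & SPEC =====
def Spec_parse_fasta_len (text : String) (out : Int) : Prop := out = parse_fasta_len_alt text
instance (text : String) (out : Int) : Decidable (Spec_parse_fasta_len text out) := by unfold Spec_parse_fasta_len; infer_instance

-- ===== CLAIM (what is proved, stated in full; the proofs are below) =====
def Claim_equal_parse_fasta_len : Prop := ∀ (text : String), Dom_parse_fasta_len text → Spec_parse_fasta_len text (parse_fasta_len text)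

-- ===== LEMMAS AND PROOFS =====

-- abbreviation for A's accumulator result measured as B measures it
def pvLenJoin (parts : List String) : Int := PySem.Str.len (PySem.Str.join "" parts)

def pvHdrIdx (s : Int) (xs : List String) : List Int :=
  ((PySem.List.enumerate xs s).filter (fun p => PySem.Str.startswith p.2 ">")).map (·.1)

def pvAltCore (lines : List String) : Int :=
  match pvHdrIdx 0 lines with
  | [] => 0
  | h0 :: rest =>
    let stop : Int := match rest with
      | h1 :: _ => h1
      | [] => (lines.length : Int)
    ((PySem.List.slice lines (some (h0 + 1)) (some stop)).map
        (fun line => PySem.Str.len (PySem.Str.strip line))).sum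

theorem alt_eq_core (text : String) :
    parse_fasta_len_alt text = pvAltCore (PySem.Str.splitlines text) := rfl

theorem charsJoinNil_len (parts : List (List Char)) :
    (PySem.Chars.join [] parts).length = (parts.map List.length).sum := by
  induction parts with
  | nil => simp [PySem.Chars.join_nil]
  | cons x xs ih =>
    cases xs with
    | nil => simp [PySem.Chars.join_singleton]
    | cons y ys =>
      rw [PySem.Chars.join_cons_cons]
      simp only [List.append_nil, List.length_append, ih, List.map_cons, List.sum_cons]

theorem pvLenJoin_eq (parts : List String) :
    pvLenJoin parts = (parts.map PySem.Str.len).sum := by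
  unfold pvLenJoin
  rw [PySem.Str.len_eq, PySem.Str.toList_join]
  have h2 : ∀ ps : List String,
      (ps.map PySem.Str.len).sum = ((((ps.map String.toList).map List.length).sum : Nat) : Int) := by
    intro ps
    induction ps with
    | nil => simp
    | cons a l ih => simp [PySem.Str.len_eq, ih]
  rw [h2]
  have h3 : ("" : String).toList = [] := rfl
  rw [h3, charsJoinNil_len]

theorem loopA_acc (ls : List String) (seq : List String) (b : Bool) :
    pvLoopA ls seq b = seq ++ pvLoopA ls [] b := by
  induction ls generalizing seq b with
  | nil => simp [pvLoopA]
  | cons l rest ih =>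
    simp only [pvLoopA]
    cases b with
    | false =>
      cases hs : PySem.Str.startswith l ">" with
      | false =>
        simp only [Bool.false_eq_true, eq_self_iff_true, if_true, if_false]
        exact ih seq false
      | true =>
        simp only [Bool.false_eq_true, eq_self_iff_true, if_true, if_false]
        exact ih seq true
    | true =>
      cases hs : PySem.Str.startswith l ">" with
      | false =>
        simp only [Bool.false_eq_true, eq_self_iff_true, if_true, if_false, List.nil_append]
        rw [ih (seq ++ [PySem.Str.strip l]) true, ih [PySem.Str.strip l] true]
        simp
      | true =>
        simp only [Bool.false_eq_true, eq_self_iff_true, if_true, if_false]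
        simp

theorem loopA_true (ls : List String) :
    pvLoopA ls [] true
      = (ls.takeWhile (fun l => !PySem.Str.startswith l ">")).map PySem.Str.strip := by
  induction ls with
  | nil => simp [pvLoopA]
  | cons l rest ih =>
    simp only [pvLoopA, List.takeWhile_cons]
    cases hs : PySem.Str.startswith l ">" with
    | false =>
      simp only [Bool.not_false, Bool.false_eq_true, eq_self_iff_true, if_true, if_false, if_true, List.map_cons, List.nil_append]
      rw [loopA_acc rest [PySem.Str.strip l] true, ih]
      rfl
    | true =>
      simp only [Bool.not_true, Bool.false_eq_true, eq_self_iff_true, if_true, if_false, if_true, List.map_nil]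

theorem loopA_false_skip (pre ys : List String)
    (h : ∀ l ∈ pre, PySem.Str.startswith l ">" = false) :
    pvLoopA (pre ++ ys) [] false = pvLoopA ys [] false := by
  induction pre with
  | nil => simp
  | cons l pre' ih =>
    have hl : PySem.Str.startswith l ">" = false := h l (by simp)
    simp only [List.cons_append, pvLoopA]
    rw [hl]
    simp only [Bool.false_eq_true, eq_self_iff_true, if_true, if_false]
    exact ih (fun x hx => h x (by simp [hx]))

theorem loopA_false_none (xs : List String)
    (h : ∀ l ∈ xs, PySem.Str.startswith l ">" = false) : pvLoopA xs [] false = [] := by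
  have h2 := loopA_false_skip xs [] h
  rw [List.append_nil] at h2
  rw [h2]
  rfl

theorem hdr_nil (s : Int) : pvHdrIdx s [] = [] := rfl

theorem hdr_cons (s : Int) (l : String) (ls : List String) :
    pvHdrIdx s (l :: ls)
      = if PySem.Str.startswith l ">" then s :: pvHdrIdx (s + 1) ls else pvHdrIdx (s + 1) ls := by
  simp only [pvHdrIdx, PySem.List.enumerate_cons, List.filter_cons]
  cases hs : PySem.Str.startswith l ">" with
  | false => simp only [Bool.false_eq_true, eq_self_iff_true, if_true, if_false]
  | true => simp only [Bool.false_eq_true, eq_self_iff_true, if_true, if_false, List.map_cons]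

theorem hdr_append (s : Int) (xs ys : List String) :
    pvHdrIdx s (xs ++ ys) = pvHdrIdx s xs ++ pvHdrIdx (s + xs.length) ys := by
  simp only [pvHdrIdx, PySem.List.enumerate_append, List.filter_append, List.map_append]

theorem hdr_none (xs : List String) (s : Int)
    (h : ∀ l ∈ xs, PySem.Str.startswith l ">" = false) : pvHdrIdx s xs = [] := by
  induction xs generalizing s with
  | nil => rfl
  | cons l ls ih =>
    rw [hdr_cons, h l (by simp)]
    simp only [Bool.false_eq_true, eq_self_iff_true, if_true, if_false]
    exact ih (s + 1) (fun x hx => h x (by simp [hx]))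

theorem hdr_nil_iff (xs : List String) (s : Int) :
    pvHdrIdx s xs = [] ↔ ∀ l ∈ xs, PySem.Str.startswith l ">" = false := by
  induction xs generalizing s with
  | nil => simp [hdr_nil]
  | cons l ls ih =>
    rw [hdr_cons]
    cases hs : PySem.Str.startswith l ">" with
    | false =>
      simp only [Bool.false_eq_true, eq_self_iff_true, if_true, if_false]
      rw [ih (s + 1)]
      constructor
      · intro hp x hx
        rcases List.mem_cons.mp hx with rfl | hx'
        · exact hs
        · exact hp x hx'
      · intro hp x hx
        exact hp x (List.mem_cons_of_mem _ hx)
    | true =>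
      simp only [Bool.false_eq_true, eq_self_iff_true, if_true, if_false]
      refine iff_of_false (by simp) ?_
      intro hp
      have hc := hp l (by simp)
      rw [hs] at hc
      simp at hc

theorem hdr_head (xs : List String) (s t : Int) (rest : List Int)
    (h : pvHdrIdx s xs = t :: rest) :
    t = s + ((xs.takeWhile (fun l => !PySem.Str.startswith l ">")).length : Int) := by
  induction xs generalizing s t rest with
  | nil => simp [hdr_nil] at h
  | cons l ls ih =>
    rw [hdr_cons] at h
    cases hs : PySem.Str.startswith l ">" with
    | true =>
      rw [hs] at h
      simp only [Bool.false_eq_true, eq_self_iff_true, if_true, if_false] at h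
      injection h with h1 _
      rw [List.takeWhile_cons]
      simp only [hs, Bool.not_true, Bool.false_eq_true, eq_self_iff_true, if_true, if_false, List.length_nil, Nat.cast_zero]
      omega
    | false =>
      rw [hs] at h
      simp only [Bool.false_eq_true, eq_self_iff_true, if_true, if_false] at h
      have ht := ih (s + 1) t rest h
      rw [List.takeWhile_cons]
      simp only [hs, Bool.not_false, Bool.false_eq_true, eq_self_iff_true, if_true, if_false, List.length_cons]
      push_cast
      push_cast at ht
      omega

theorem take_takeWhile_len {α : Type} (p : α → Bool) (l : List α) :
    l.take (l.takeWhile p).length = l.takeWhile p := by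
  induction l with
  | nil => simp
  | cons x xs ih =>
    by_cases hx : p x = true <;> simp [List.takeWhile_cons, hx, ih]

theorem dropWhile_head_false {α : Type} (p : α → Bool) (l : List α) (x : α) (xs : List α)
    (h : l.dropWhile p = x :: xs) : p x = false := by
  induction l with
  | nil => simp at h
  | cons a t ih =>
    rw [List.dropWhile_cons] at h
    split at h
    · exact ih h
    · rename_i hp; cases h; simpa using hp

theorem core_main (lines : List String) :
    pvLenJoin (pvLoopA lines [] false) = pvAltCore lines := by
  set pre := lines.takeWhile (fun l => !PySem.Str.startswith l ">") with hpredef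
  set suf := lines.dropWhile (fun l => !PySem.Str.startswith l ">") with hsufdef
  have hdecomp : lines = pre ++ suf := by
    rw [hpredef, hsufdef, List.takeWhile_append_dropWhile]
  have hpre : ∀ l ∈ pre, PySem.Str.startswith l ">" = false := by
    intro l hl
    rw [hpredef] at hl
    have h1 := List.mem_takeWhile_imp hl
    have h2 : (!PySem.Str.startswith l ">") = true := h1
    cases hb : PySem.Str.startswith l ">" with
    | false => rfl
    | true => rw [hb] at h2; simp at h2
  cases hsuf : suf with
  | nil =>
    have hall : ∀ l ∈ lines, PySem.Str.startswith l ">" = false := by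
      intro l hl
      rw [hdecomp, hsuf, List.append_nil] at hl
      exact hpre l hl
    have h0 : pvHdrIdx 0 lines = [] := hdr_none _ _ hall
    unfold pvAltCore
    rw [h0]
    show pvLenJoin (pvLoopA lines [] false) = 0
    have hA : pvLoopA lines [] false = [] := by
      conv_lhs => rw [hdecomp, hsuf]
      rw [List.append_nil]
      exact loopA_false_none pre hpre
    rw [hA]
    decide
  | cons hd post =>
    have hcons : lines.dropWhile (fun l => !PySem.Str.startswith l ">") = hd :: post := by
      rw [← hsufdef]; exact hsuf
    have hSW : PySem.Str.startswith hd ">" = true := by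
      have hnb := dropWhile_head_false _ _ _ _ hcons
      have hnb2 : (!PySem.Str.startswith hd ">") = false := hnb
      cases hb : PySem.Str.startswith hd ">" with
      | true => rfl
      | false => rw [hb] at hnb2; simp at hnb2
    have hlines : lines = pre ++ hd :: post := by rw [hdecomp, hsuf]
    have hhdr : pvHdrIdx 0 lines
        = (pre.length : Int) :: pvHdrIdx ((pre.length : Int) + 1) post := by
      rw [hlines, hdr_append, hdr_none pre 0 hpre, hdr_cons, if_pos hSW]
      simp only [List.nil_append, zero_add]
    have hdropA : pvLoopA lines [] false
        = (post.takeWhile (fun l => !PySem.Str.startswith l ">")).map PySem.Str.strip := by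
      conv_lhs => rw [hlines]
      rw [loopA_false_skip pre _ hpre]
      simp only [pvLoopA]
      rw [hSW]
      simp only [Bool.false_eq_true, eq_self_iff_true, if_true, if_false]
      exact loopA_true post
    have hdrop : lines.drop (pre.length + 1) = post := by
      rw [hlines]
      have hsplit : pre ++ hd :: post = (pre ++ [hd]) ++ post := by simp
      rw [hsplit]
      have hlen : (pre ++ [hd]).length = pre.length + 1 := by simp
      rw [← hlen, List.drop_left]
    unfold pvAltCore
    rw [hhdr]
    cases hrest : pvHdrIdx ((pre.length : Int) + 1) post with
    | nil =>
      show pvLenJoin (pvLoopA lines [] false)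
          = ((PySem.List.slice lines (some ((pre.length : Int) + 1))
              (some ((lines.length : Nat) : Int))).map
              (fun line => PySem.Str.len (PySem.Str.strip line))).sum
      have hallpost : ∀ l ∈ post, PySem.Str.startswith l ">" = false :=
        (hdr_nil_iff post _).mp hrest
      have htwp : post.takeWhile (fun l => !PySem.Str.startswith l ">") = post := by
        rw [List.takeWhile_eq_self_iff]
        intro x hx
        show (!PySem.Str.startswith x ">") = true
        rw [hallpost x hx]
        rfl
      have hlen2 : lines.length = pre.length + 1 + post.length := by
        rw [hlines]
        simp only [List.length_append, List.length_cons]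
        omega
      have hcast1 : ((pre.length : Int) + 1) = ((pre.length + 1 : Nat) : Int) := by push_cast; ring
      have hcast2 : ((lines.length : Nat) : Int) = ((pre.length + 1 + post.length : Nat) : Int) := by
        rw [hlen2]
      rw [hcast1, hcast2, PySem.List.slice_natCast]
      have harith : pre.length + 1 + post.length - (pre.length + 1) = post.length := by omega
      rw [harith, hdrop, List.take_length]
      rw [hdropA, pvLenJoin_eq, htwp, List.map_map]
      rfl
    | cons h1 t1 =>
      show pvLenJoin (pvLoopA lines [] false)
          = ((PySem.List.slice lines (some ((pre.length : Int) + 1)) (some h1)).map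
              (fun line => PySem.Str.len (PySem.Str.strip line))).sum
      have hh1 : h1 = (pre.length : Int) + 1
          + ((post.takeWhile (fun l => !PySem.Str.startswith l ">")).length : Int) :=
        hdr_head post _ h1 t1 hrest
      have hcast1 : ((pre.length : Int) + 1) = ((pre.length + 1 : Nat) : Int) := by push_cast; ring
      have hcast2 : h1 = ((pre.length + 1
          + (post.takeWhile (fun l => !PySem.Str.startswith l ">")).length : Nat) : Int) := by
        rw [hh1]; push_cast; ring
      rw [hcast1, hcast2, PySem.List.slice_natCast]
      have harith : pre.length + 1 + (post.takeWhile (fun l => !PySem.Str.startswith l ">")).length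
          - (pre.length + 1)
          = (post.takeWhile (fun l => !PySem.Str.startswith l ">")).length := by omega
      rw [harith, hdrop, take_takeWhile_len]
      rw [hdropA, pvLenJoin_eq, List.map_map]
      rfl

-- ===== VERDICT (by name: the statement is the Claim_ definition above) =====
theorem parse_fasta_len_spec : Claim_equal_parse_fasta_len := by
  intro text _
  show parse_fasta_len text = parse_fasta_len_alt text
  rw [alt_eq_core]
  unfold parse_fasta_len
  split
  · rename_i h
    subst h
    decide
  · exact core_main _
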